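-- pv_equiv track=rewrite | github.com/khiwniti/carbonscope | scripts/validate_coordination.py | generate_test_queries
-- ===== SOURCE A (Python) =====
-- from typing import List, Dict, Any
--
-- def generate_test_queries(num_requests: int) -> List[str]:
--     """Generate varied test queries for coordination validation.
--
--     Args:
--         num_requests: Number of test queries to generate
--
--     Returns:
--         List of diverse test queries covering all agent capabilities
--     """
--     query_templates = [
--         "Calculate carbon for BOQ",
--         "Find alternatives for {material}",
--         "Check TREES MR1 compliance",
--         "Optimize carbon footprint",
--         "Analyze cost-carbon tradeoffs for {material}",
--         "Validate BOQ data quality",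
--         "What is my carbon reduction potential?",
--         "Generate carbon report",
--         "Compare scenarios",
--         "What materials have highest carbon impact?",
--         "How to achieve TREES Gold certification?",
--         "Show me EDGE compliance status",
--         "What are emission factors for {material}?",
--         "Help me understand carbon calculation",
--         "List available material alternatives",
--         "What is the total embodied carbon?",
--         "Show breakdown by material category",
--         "How can I reduce carbon by 20%?",
--         "What is TREES MR3 requirement?",
--         "Check data quality issues",
--     ]
--
--     materials = [
--         "concrete", "steel", "aluminum", "glass", "wood",
--         "brick", "ceramic", "insulation", "gypsum", "paint"
--     ]
--
--     queries = []
--     for i in range(num_requests):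
--         template = query_templates[i % len(query_templates)]
--         if "{material}" in template:
--             material = materials[i % len(materials)]
--             query = template.format(material=material)
--         else:
--             query = template
--         queries.append(query)
--
--     return queries
-- ===== SOURCE B (Python) =====
-- from typing import List, Dict, Any
--
-- def generate_test_queries(num_requests: int) -> List[str]:
--     """Generate varied test queries (precomputed period-20 table, then tiling)."""
--     query_templates = [
--         "Calculate carbon for BOQ",
--         "Find alternatives for {material}",
--         "Check TREES MR1 compliance",
--         "Optimize carbon footprint",
--         "Analyze cost-carbon tradeoffs for {material}",
--         "Validate BOQ data quality",
--         "What is my carbon reduction potential?",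
--         "Generate carbon report",
--         "Compare scenarios",
--         "What materials have highest carbon impact?",
--         "How to achieve TREES Gold certification?",
--         "Show me EDGE compliance status",
--         "What are emission factors for {material}?",
--         "Help me understand carbon calculation",
--         "List available material alternatives",
--         "What is the total embodied carbon?",
--         "Show breakdown by material category",
--         "How can I reduce carbon by 20%?",
--         "What is TREES MR3 requirement?",
--         "Check data quality issues",
--     ]
--
--     materials = [
--         "concrete", "steel", "aluminum", "glass", "wood",
--         "brick", "ceramic", "insulation", "gypsum", "paint"
--     ]
--
--     # The output is periodic with period 20 (lcm of the two cycle lengths):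
--     # resolve each template once, then tile the 20-entry table by indexing.
--     base = [
--         t.format(material=materials[j % len(materials)]) if "{material}" in t else t
--         for j, t in enumerate(query_templates)
--     ]
--     return [base[i % 20] for i in range(num_requests)]
-- ===== Notes on version B (the rewrite author's own statement) =====
-- stated objective: alternative
-- what changed: B resolves every template into a fixed table once (the output is periodic with the lcm of the template and material cycle lengths) and produces the result by tiling that table with a plain index-modulo pass, instead of re-looking-up, substring-testing and formatting a template per generated item.
import Mathlib
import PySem

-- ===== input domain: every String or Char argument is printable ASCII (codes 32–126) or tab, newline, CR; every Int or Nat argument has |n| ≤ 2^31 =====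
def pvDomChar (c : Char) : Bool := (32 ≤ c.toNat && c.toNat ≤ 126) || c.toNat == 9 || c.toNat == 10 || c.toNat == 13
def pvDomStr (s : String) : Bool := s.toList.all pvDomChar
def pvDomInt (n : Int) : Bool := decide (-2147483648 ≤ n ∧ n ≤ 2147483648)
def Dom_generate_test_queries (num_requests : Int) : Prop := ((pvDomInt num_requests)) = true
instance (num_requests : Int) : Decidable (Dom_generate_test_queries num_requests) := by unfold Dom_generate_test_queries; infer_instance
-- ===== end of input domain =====

-- B resolves the 20 templates into a table once and tiles it by base[i % 20]; A formats per item. Alternative decomposition, same result.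

-- shared literal data (both Pythons define these same list literals)
def pvTemplates : List String := [
  "Calculate carbon for BOQ",
  "Find alternatives for {material}",
  "Check TREES MR1 compliance",
  "Optimize carbon footprint",
  "Analyze cost-carbon tradeoffs for {material}",
  "Validate BOQ data quality",
  "What is my carbon reduction potential?",
  "Generate carbon report",
  "Compare scenarios",
  "What materials have highest carbon impact?",
  "How to achieve TREES Gold certification?",
  "Show me EDGE compliance status",
  "What are emission factors for {material}?",
  "Help me understand carbon calculation",
  "List available material alternatives",
  "What is the total embodied carbon?",
  "Show breakdown by material category",
  "How can I reduce carbon by 20%?",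
  "What is TREES MR3 requirement?",
  "Check data quality issues"]

def pvMaterials : List String := [
  "concrete", "steel", "aluminum", "glass", "wood",
  "brick", "ceramic", "insulation", "gypsum", "paint"]

-- ===== PORT A =====
-- template.format(material=m) is ported as replacing "{material}" by m: exact here because
-- every template's only brace construct is the single "{material}" placeholder.
-- The .getD "" after pyGet? is unreachable: i % len is always a valid index.
def generate_test_queries (num_requests : Int) : List String :=
  (PySem.List.pyRange 0 num_requests 1).foldl (fun queries i =>
    let template := (PySem.List.pyGet? pvTemplates (i % (pvTemplates.length : Int))).getD ""
    let query :=
      if PySem.Str.isIn "{material}" template then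
        PySem.Str.replace template "{material}"
          ((PySem.List.pyGet? pvMaterials (i % (pvMaterials.length : Int))).getD "")
      else template
    queries ++ [query]) []

-- ===== PORT B =====
def generate_test_queries_alt (num_requests : Int) : List String :=
  let base := (PySem.List.enumerate pvTemplates 0).map (fun jt =>
    if PySem.Str.isIn "{material}" jt.2 then
      PySem.Str.replace jt.2 "{material}"
        (PySem.List.pyGetD pvMaterials (jt.1 % (pvMaterials.length : Int)) "")
    else jt.2)
  (PySem.List.pyRange 0 num_requests 1).map (fun i => PySem.List.pyGetD base (i % 20) "")

-- ===== PRECONDITION & SPEC =====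
def Spec_generate_test_queries (num_requests : Int) (out : List String) : Prop := out = generate_test_queries_alt num_requests
instance (num_requests : Int) (out : List String) : Decidable (Spec_generate_test_queries num_requests out) := by unfold Spec_generate_test_queries; infer_instance

-- ===== CLAIM (what is proved, stated in full; the proofs are below) =====
def Claim_equal_generate_test_queries : Prop := ∀ (num_requests : Int), Dom_generate_test_queries num_requests → Spec_generate_test_queries num_requests (generate_test_queries num_requests)

-- ===== LEMMAS AND PROOFS =====

-- the per-index value produced by A's loop body
def pvBodyA (i : Int) : String :=
  let template := (PySem.List.pyGet? pvTemplates (i % (pvTemplates.length : Int))).getD ""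
  if PySem.Str.isIn "{material}" template then
    PySem.Str.replace template "{material}"
      ((PySem.List.pyGet? pvMaterials (i % (pvMaterials.length : Int))).getD "")
  else template

-- B's resolved table, and its shape as a comprehension over range(20)
def pvResolve (jt : Int × String) : String :=
  if PySem.Str.isIn "{material}" jt.2 then
    PySem.Str.replace jt.2 "{material}"
      (PySem.List.pyGetD pvMaterials (jt.1 % (pvMaterials.length : Int)) "")
  else jt.2

def pvBase : List String := (PySem.List.enumerate pvTemplates 0).map pvResolve

theorem pvBase_eq_map_pyRange :
    pvBase = (PySem.List.pyRange 0 (pvTemplates.length : Int) 1).map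
      (fun j => pvResolve (j, PySem.List.pyGetD pvTemplates j "")) := by
  unfold pvBase
  rw [PySem.List.enumerate_eq_map_pyRange (d := "")]
  simp [List.map_map, Function.comp]

-- the key pointwise fact: A's body at i equals B's table entry at i % 20, symbolically
theorem pvBody_periodic (i : Int) (_h0 : 0 ≤ i) :
    pvBodyA i = PySem.List.pyGetD pvBase (i % 20) "" := by
  have hj0 : 0 ≤ i % 20 := Int.emod_nonneg i (by norm_num)
  have hj1 : i % 20 < 20 := Int.emod_lt_of_pos i (by norm_num)
  have ht : (pvTemplates.length : Int) = 20 := by decide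
  have hm : (pvMaterials.length : Int) = 10 := by decide
  rw [pvBase_eq_map_pyRange, ht,
    PySem.List.pyGetD_map_pyRange_of_nonneg _ _ _ _ hj0 hj1]
  unfold pvBodyA pvResolve
  rw [ht, hm]
  have h10 : i % 10 = i % 20 % 10 := (Int.emod_emod_of_dvd i (by norm_num : (10:Int) ∣ 20)).symm
  simp only [h10, PySem.List.pyGetD]

-- ===== VERDICT (by name: the statement is the Claim_ definition above) =====
theorem generate_test_queries_spec : Claim_equal_generate_test_queries := by
  intro n _
  unfold Spec_generate_test_queries generate_test_queries generate_test_queries_alt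
  rw [PySem.List.foldl_append_singleton_eq_map]
  simp only [List.nil_append]
  apply List.map_congr_left
  intro i hi
  rw [PySem.List.mem_pyRange_one] at hi
  exact pvBody_periodic i hi.1
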